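-- pv_equiv track=rewrite | github.com/ChanMeng666/juejin-algorithm-practice | problems/006-longest-defeatable-monster-sequence/solution.py | solution
-- ===== SOURCE A (Python) =====
-- def solution(n: int, H: int, A: int, h: list, a: list) -> int:
--     # Create an array to store the length of the longest defeatable sequence ending at each monster
--     dp = [0] * n
--
--     # Iterate through each monster
--     for i in range(n):
--         # If the current monster can be defeated
--         if H > h[i] and A > a[i]:
--             # Initialize to 1, meaning at least the current monster can be defeated
--             dp[i] = 1
--             # Check previous monsters
--             for j in range(i):
--                 # If the previous monster was also defeated and satisfies the sequence requirement
--                 if dp[j] > 0 and h[i] > h[j] and a[i] > a[j]: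
--                     # Update the longest sequence length
--                     dp[i] = max(dp[i], dp[j] + 1)
--
--     # Return the longest sequence length
--     return max(dp) if any(dp) else 0
-- ===== SOURCE B (Python) =====
-- def solution(n: int, H: int, A: int, h: list, a: list) -> int:
--     # Mirsky-style layer peeling: no dp values at all.  The answer is the number
--     # of antichain layers of the dominance order (index, h, a all strictly
--     # increasing) on the defeatable monsters: each pass deletes the minimal
--     # monsters (those with no surviving dominated predecessor), which strips
--     # exactly one element off every longest chain, so the number of passes
--     # until the set is empty equals the longest chain length.
--     items = [(i, h[i], a[i]) for i in range(n) if H > h[i] and A > a[i]]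
--     rounds = 0
--     while items:
--         items = [x for x in items
--                  if any(y[0] < x[0] and y[1] < x[1] and y[2] < x[2] for y in items)]
--         rounds += 1
--     return rounds
-- ===== Notes on version B (the rewrite author's own statement) =====
-- stated objective: alternative
-- what changed: B computes no chain lengths at all: instead of A's O(n^2) dp array of longest-chain-ending-here values, it uses Mirsky layer peeling - collect the defeatable monsters once, then repeatedly delete the minimal elements of the dominance order (those with no surviving dominated predecessor) and count the peeling rounds; the number of rounds equals the longest chain length.
-- outside the precondition, e.g. on solution(1, 0, 10, [5], []): A returns 0, B returns 0
import Mathlib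
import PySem

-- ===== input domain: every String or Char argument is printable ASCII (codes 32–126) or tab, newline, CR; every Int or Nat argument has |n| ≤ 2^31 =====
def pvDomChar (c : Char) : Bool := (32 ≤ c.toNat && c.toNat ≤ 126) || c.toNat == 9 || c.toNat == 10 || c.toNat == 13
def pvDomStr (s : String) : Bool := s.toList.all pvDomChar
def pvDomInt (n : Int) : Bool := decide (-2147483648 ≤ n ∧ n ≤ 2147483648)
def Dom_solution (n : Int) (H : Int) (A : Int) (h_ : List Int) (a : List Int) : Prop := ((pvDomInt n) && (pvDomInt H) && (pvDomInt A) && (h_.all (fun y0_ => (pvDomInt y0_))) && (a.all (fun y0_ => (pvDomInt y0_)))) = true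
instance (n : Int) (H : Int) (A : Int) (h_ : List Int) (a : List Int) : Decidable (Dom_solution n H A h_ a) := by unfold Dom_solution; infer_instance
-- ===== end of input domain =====

-- B replaces A's longest-chain dp array with Mirsky layer peeling: it keeps no lengths,
-- it repeatedly deletes the minimal defeatable monsters and counts rounds (same result,
-- a genuinely different algorithm; not claimed faster).

-- ===== PORT A =====
def solution (n : Int) (H : Int) (A : Int) (h_ : List Int) (a : List Int) : Int :=
  -- dp = [0] * n
  let dp0 : List Int := List.replicate n.toNat 0
  -- for i in range(n): …
  let dp := (PySem.List.pyRange 0 n 1).foldl (fun dp i =>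
    if H > PySem.List.pyGetD h_ i 0 ∧ A > PySem.List.pyGetD a i 0 then
      -- dp[i] = 1; for j in range(i): …  (dp[i] is only read at index j < i, so the
      -- running value can be accumulated and written once at the end of the inner loop)
      let v := (PySem.List.pyRange 0 i 1).foldl (fun v j =>
        if PySem.List.pyGetD dp j 0 > 0 ∧ PySem.List.pyGetD h_ i 0 > PySem.List.pyGetD h_ j 0 ∧
            PySem.List.pyGetD a i 0 > PySem.List.pyGetD a j 0 then
          max v (PySem.List.pyGetD dp j 0 + 1)
        else v) 1
      PySem.List.pySetD dp i v
    else dp) dp0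
  -- return max(dp) if any(dp) else 0
  if dp.any (fun x => decide (x ≠ 0)) then (PySem.List.max? dp (fun y => y)).getD 0 else 0

-- ===== PORT B =====
-- one peeling pass: keep only the monsters that still have a dominated predecessor
def pvKeepB (items : List (Int × Int × Int)) : List (Int × Int × Int) :=
  items.filter (fun x => items.any (fun y =>
    decide (y.1 < x.1) && decide (y.2.1 < x.2.1) && decide (y.2.2 < x.2.2)))

-- termination lemmas for the while loop (cited by decreasing_by)
lemma pvMinExists (items : List (Int × Int × Int)) (hne : items ≠ []) :
    ∃ x ∈ items, ∀ y ∈ items, ¬ y.1 < x.1 := by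
  induction items with
  | nil => exact absurd rfl hne
  | cons z l ih =>
    rcases l with _ | ⟨w, l'⟩
    · exact ⟨z, by simp, by rintro y hy; simp at hy; subst hy; omega⟩
    · obtain ⟨x, hx, hmin⟩ := ih (by simp)
      by_cases hz : z.1 ≤ x.1
      · refine ⟨z, by simp, ?_⟩
        rintro y hy
        rcases List.mem_cons.mp hy with rfl | hy'
        · omega
        · have := hmin y hy'; omega
      · refine ⟨x, List.mem_cons_of_mem _ hx, ?_⟩
        rintro y hy
        rcases List.mem_cons.mp hy with rfl | hy'
        · omega
        · exact hmin y hy'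

lemma pvKeep_lt (items : List (Int × Int × Int)) (hne : items ≠ []) :
    (pvKeepB items).length < items.length := by
  obtain ⟨x, hx, hmin⟩ := pvMinExists items hne
  refine List.length_filter_lt_length_iff_exists.mpr ⟨x, hx, ?_⟩
  simp only [List.any_eq_true, Bool.and_eq_true, decide_eq_true_eq]
  rintro ⟨y, hy, ⟨hlt, -⟩, -⟩
  exact hmin y hy hlt

-- while items: items = [x for x in items if any(… for y in items)]; rounds += 1
def pvPeelB (items : List (Int × Int × Int)) : Int :=
  if hne : items = [] then 0
  else 1 + pvPeelB (pvKeepB items)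
termination_by items.length
decreasing_by exact pvKeep_lt items hne

def solution_alt (n : Int) (H : Int) (A : Int) (h_ : List Int) (a : List Int) : Int :=
  -- items = [(i, h[i], a[i]) for i in range(n) if H > h[i] and A > a[i]]
  let items := (PySem.List.pyRange 0 n 1).filterMap (fun i =>
    if H > PySem.List.pyGetD h_ i 0 ∧ A > PySem.List.pyGetD a i 0 then
      some (i, PySem.List.pyGetD h_ i 0, PySem.List.pyGetD a i 0)
    else none)
  pvPeelB items

-- ===== PRECONDITION & SPEC =====
-- Pre_ excludes n exceeding a list length: there A raises IndexError, except in the corner where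
-- the short-circuit 'H > h[i] and A > a[i]' never reads the too-short a (cited in claim.json).
def Pre_solution (n : Int) (H : Int) (A : Int) (h_ : List Int) (a : List Int) : Prop :=
  n ≤ (h_.length : Int) ∧ n ≤ (a.length : Int)
instance (n : Int) (H : Int) (A : Int) (h_ : List Int) (a : List Int) : Decidable (Pre_solution n H A h_ a) := by unfold Pre_solution; infer_instance

def pvWitness_solution : Int × Int × Int × List Int × List Int := (3, 10, 10, [1, 3, 2], [1, 2, 3])

def Spec_solution (n : Int) (H : Int) (A : Int) (h_ : List Int) (a : List Int) (out : Int) : Prop := out = solution_alt n H A h_ a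
instance (n : Int) (H : Int) (A : Int) (h_ : List Int) (a : List Int) (out : Int) : Decidable (Spec_solution n H A h_ a out) := by unfold Spec_solution; infer_instance

-- ===== CLAIM (what is proved, stated in full; the proofs are below) =====
def Claim_equal_solution : Prop := ∀ (n : Int) (H : Int) (A : Int) (h_ : List Int) (a : List Int), Dom_solution n H A h_ a → Pre_solution n H A h_ a → Spec_solution n H A h_ a (solution n H A h_ a)

-- ===== LEMMAS AND PROOFS =====

-- 'monster i is defeatable'
def pvDft (H A : Int) (h_ a : List Int) (i : Nat) : Bool :=
  decide (h_.getD i 0 < H) && decide (a.getD i 0 < A)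

-- 'j is a dominated defeatable predecessor of i'
def pvC (H A : Int) (h_ a : List Int) (i j : Nat) : Bool :=
  pvDft H A h_ a j && decide (h_.getD j 0 < h_.getD i 0) && decide (a.getD j 0 < a.getD i 0)

-- the value A's dp array ends up holding at a defeatable index i
def pvVal (H A : Int) (h_ a : List Int) (i : Nat) : Int :=
  ((List.range i).attach.map (fun j =>
    if pvC H A h_ a i j.1 then pvVal H A h_ a j.1 else 0)).foldl max 0 + 1
termination_by i
decreasing_by exact List.mem_range.mp j.2

lemma pvVal_eq (H A : Int) (h_ a : List Int) (i : Nat) :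
    pvVal H A h_ a i =
      ((List.range i).map (fun j => if pvC H A h_ a i j then pvVal H A h_ a j else 0)).foldl max 0 + 1 := by
  rw [pvVal]
  congr 2
  apply List.ext_getElem
  · simp
  · intro k h1 h2
    simp

-- max-fold facts
lemma pvFmInit (L : List Int) (c : Int) : c ≤ L.foldl max c := by
  induction L generalizing c with
  | nil => simp
  | cons x l ih => exact le_trans (le_max_left c x) (ih (max c x))

lemma pvFmMem (L : List Int) (c t : Int) (ht : t ∈ L) : t ≤ L.foldl max c := by
  induction L generalizing c with
  | nil => simp at ht
  | cons x l ih =>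
    rcases List.mem_cons.mp ht with rfl | h
    · exact le_trans (le_max_right c t) (pvFmInit l (max c t))
    · exact ih (max c x) h

lemma pvFmCases (L : List Int) (c : Int) : L.foldl max c = c ∨ L.foldl max c ∈ L := by
  induction L generalizing c with
  | nil => left; rfl
  | cons x l ih =>
    rcases ih (max c x) with h | h
    · simp only [List.foldl_cons, h]
      rcases max_choice c x with h' | h'
      · left; exact h'
      · right; simp [h']
    · right; exact List.mem_cons_of_mem _ h

lemma pvFoldMaxSucc (T : List Int) (c : Int) :
    List.foldl (fun v t => max v (t + 1)) (c + 1) T = List.foldl max c T + 1 := by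
  induction T generalizing c with
  | nil => rfl
  | cons x t ih =>
      simp only [List.foldl_cons]
      have h : max (c + 1) (x + 1) = max c x + 1 := by omega
      rw [h]; exact ih (max c x)

lemma pvFoldPlusOne (L : List Nat) (e : Nat → Int) :
    L.foldl (fun v j => max v (e j + 1)) 1 = (L.map e).foldl max 0 + 1 := by
  have h := pvFoldMaxSucc (L.map e) 0
  rw [List.foldl_map] at h
  simpa using h

lemma pvVal_pos (H A : Int) (h_ a : List Int) (i : Nat) : 1 ≤ pvVal H A h_ a i := by
  rw [pvVal_eq]
  have := pvFmInit ((List.range i).map (fun j => if pvC H A h_ a i j then pvVal H A h_ a j else 0)) 0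
  omega

-- A's outer-loop body, on Nat indices
def pvStepA (H A : Int) (h_ a : List Int) (dp : List Int) (k : Nat) : List Int :=
  if H > h_.getD k 0 ∧ A > a.getD k 0 then
    dp.set k ((List.range k).foldl (fun v j =>
      if dp.getD j 0 > 0 ∧ h_.getD k 0 > h_.getD j 0 ∧ a.getD k 0 > a.getD j 0 then
        max v (dp.getD j 0 + 1)
      else v) 1)
  else dp

def pvDpA (n H A : Int) (h_ a : List Int) (k : Nat) : List Int :=
  (List.range k).foldl (pvStepA H A h_ a) (List.replicate n.toNat 0)

lemma pvSolutionA_eq (n H A : Int) (h_ a : List Int) :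
    solution n H A h_ a =
      (if (pvDpA n H A h_ a n.toNat).any (fun x => decide (x ≠ 0)) then
        (PySem.List.max? (pvDpA n H A h_ a n.toNat) (fun y => y)).getD 0 else 0) := by
  simp only [solution, pvDpA, PySem.List.pyRange_one, Int.sub_zero, zero_add,
    Int.toNat_natCast, List.foldl_map, PySem.List.pyGetD_natCast, PySem.List.pySetD_natCast]
  rfl

lemma pvGetDRep (N i : Nat) : (List.replicate N (0 : Int)).getD i 0 = 0 := by
  by_cases h : i < N
  · rw [List.getD_eq_getElem _ _ (by simpa using h)]; simp
  · rw [List.getD_eq_default _ _ (by simpa using Nat.le_of_not_lt h)]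

lemma pvGetDSet (l : List Int) (k : Nat) (hk : k < l.length) (v : Int) (i : Nat) :
    (l.set k v).getD i 0 = if i = k then v else l.getD i 0 := by
  by_cases h : i = k
  · subst h
    rw [List.getD_eq_getElem _ _ (by simpa using hk), if_pos rfl, List.getElem_set_self]
  · rw [if_neg h]
    by_cases hi : i < l.length
    · rw [List.getD_eq_getElem _ _ (by simpa using hi), List.getD_eq_getElem _ _ hi,
        List.getElem_set_ne (by omega)]
    · rw [List.getD_eq_default _ _ (by simpa using Nat.le_of_not_lt hi),
        List.getD_eq_default _ _ (Nat.le_of_not_lt hi)]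

-- congruence for the inner loop: the running value stays ≥ 1, so an always-taken
-- 'max v (e j + 1)' step with e j = 0 on non-predecessors is the same fold
lemma pvFoldIf (L : List Nat) (P : Nat → Prop) [DecidablePred P] (c : Nat → Bool)
    (d e : Nat → Int) (hpc : ∀ j ∈ L, P j ↔ c j = true) (hde : ∀ j ∈ L, c j = true → d j = e j) :
    ∀ v : Int, 1 ≤ v →
      L.foldl (fun v j => if P j then max v (d j + 1) else v) v
        = L.foldl (fun v j => max v ((if c j then e j else 0) + 1)) v := by
  induction L with
  | nil => intro v _; rfl
  | cons x l ih =>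
    intro v hv
    simp only [List.foldl_cons]
    by_cases hp : P x
    · have hc : c x = true := (hpc x (by simp)).mp hp
      rw [if_pos hp, if_pos hc, hde x (by simp) hc]
      exact ih (fun j hj => hpc j (by simp [hj])) (fun j hj => hde j (by simp [hj]))
        _ (le_trans hv (le_max_left _ _))
    · have hc : c x = false := by
        by_contra h
        exact hp ((hpc x (by simp)).mpr (by simpa using h))
      rw [if_neg hp, hc, if_neg (by simp)]
      have : max v ((0 : Int) + 1) = v := by omega
      rw [this]
      exact ih (fun j hj => hpc j (by simp [hj])) (fun j hj => hde j (by simp [hj])) v hv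

-- the inner loop computes exactly pvVal k when dp holds pvVal on the processed prefix
lemma pvInner (H A : Int) (h_ a : List Int) (dp : List Int) (k : Nat)
    (h1 : ∀ j, j < k → pvDft H A h_ a j = true → dp.getD j 0 = pvVal H A h_ a j)
    (h0 : ∀ j, ¬(j < k ∧ pvDft H A h_ a j = true) → dp.getD j 0 = 0) :
    (List.range k).foldl (fun v j =>
      if dp.getD j 0 > 0 ∧ h_.getD k 0 > h_.getD j 0 ∧ a.getD k 0 > a.getD j 0 then
        max v (dp.getD j 0 + 1) else v) 1
    = pvVal H A h_ a k := by
  have hpc : ∀ j ∈ List.range k,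
      ((dp.getD j 0 > 0 ∧ h_.getD k 0 > h_.getD j 0 ∧ a.getD k 0 > a.getD j 0)
        ↔ pvC H A h_ a k j = true) := by
    intro j hj
    have hjk : j < k := List.mem_range.mp hj
    constructor
    · rintro ⟨hpos, hh, ha⟩
      have hd : pvDft H A h_ a j = true := by
        by_contra hnd
        have := h0 j (by tauto); omega
      simp only [pvC, hd, Bool.true_and, Bool.and_eq_true, decide_eq_true_eq]
      exact ⟨hh, ha⟩
    · intro hb
      simp only [pvC, Bool.and_eq_true, decide_eq_true_eq] at hb
      obtain ⟨⟨hd, hh⟩, ha⟩ := hb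
      have := h1 j hjk hd
      have := pvVal_pos H A h_ a j
      exact ⟨by omega, hh, ha⟩
  have hde : ∀ j ∈ List.range k, pvC H A h_ a k j = true → dp.getD j 0 = pvVal H A h_ a j := by
    intro j hj hc
    simp only [pvC, Bool.and_eq_true] at hc
    exact h1 j (List.mem_range.mp hj) hc.1.1
  rw [pvFoldIf (List.range k) _ (pvC H A h_ a k) (fun j => dp.getD j 0) (pvVal H A h_ a)
    hpc hde 1 le_rfl,
    pvFoldPlusOne (List.range k) (fun j => if pvC H A h_ a k j then pvVal H A h_ a j else 0),
    ← pvVal_eq]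

-- dp invariant: after processing the first k monsters, dp holds pvVal at the
-- defeatable processed indices and 0 everywhere else
lemma pvInv (n H A : Int) (h_ a : List Int) :
    ∀ k, k ≤ n.toNat →
      (pvDpA n H A h_ a k).length = n.toNat ∧
      (∀ i, i < k → pvDft H A h_ a i = true → (pvDpA n H A h_ a k).getD i 0 = pvVal H A h_ a i) ∧
      (∀ i, ¬(i < k ∧ pvDft H A h_ a i = true) → (pvDpA n H A h_ a k).getD i 0 = 0) := by
  intro k
  induction k with
  | zero =>
      intro _
      refine ⟨by simp [pvDpA], by omega, ?_⟩
      intro i _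
      simp only [pvDpA, List.range_zero, List.foldl_nil]; exact pvGetDRep n.toNat i
  | succ k ih =>
      intro hk1
      obtain ⟨hlen, h1, h0⟩ := ih (Nat.le_of_succ_le hk1)
      have hkN : k < n.toNat := hk1
      have hdp1 : pvDpA n H A h_ a (k + 1) = pvStepA H A h_ a (pvDpA n H A h_ a k) k := by
        simp [pvDpA, List.range_succ]
      by_cases hd : pvDft H A h_ a k = true
      · have hcond : H > h_.getD k 0 ∧ A > a.getD k 0 := by simpa [pvDft] using hd
        set dp := pvDpA n H A h_ a k with hdp
        have hklen : k < dp.length := by omega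
        have hdp2 : pvDpA n H A h_ a (k + 1) = dp.set k (pvVal H A h_ a k) := by
          rw [hdp1, pvStepA, if_pos hcond, pvInner H A h_ a dp k h1 h0]
        refine ⟨by rw [hdp2]; simpa using hlen, ?_, ?_⟩
        · intro i hik1 hdfti
          rw [hdp2, pvGetDSet dp k hklen _ i]
          by_cases hik : i = k
          · rw [if_pos hik, hik]
          · rw [if_neg hik]; exact h1 i (by omega) hdfti
        · intro i hni
          rw [hdp2, pvGetDSet dp k hklen _ i]
          have hik : i ≠ k := by
            intro h; exact hni (by constructor <;> [omega; (rw [h]; exact hd)])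
          rw [if_neg hik]
          exact h0 i (by tauto)
      · have hcond : ¬(H > h_.getD k 0 ∧ A > a.getD k 0) := by simpa [pvDft] using hd
        have hdp2 : pvDpA n H A h_ a (k + 1) = pvDpA n H A h_ a k := by
          rw [hdp1, pvStepA, if_neg hcond]
        refine ⟨by rw [hdp2]; exact hlen, ?_, ?_⟩
        · intro i hik1 hdfti
          have hik : i ≠ k := by intro h; rw [h] at hdfti; exact hd hdfti
          rw [hdp2]; exact h1 i (by omega) hdfti
        · intro i hni
          rw [hdp2]
          refine h0 i ?_
          rintro ⟨hik, hdfti⟩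
          exact hni ⟨by omega, hdfti⟩

-- eligible Nat indices, the maximal dp value, the embedded triple, the layer lists
def pvI (n H A : Int) (h_ a : List Int) : List Nat :=
  (List.range n.toNat).filter (pvDft H A h_ a)

def pvM (n H A : Int) (h_ a : List Int) : Int :=
  ((pvI n H A h_ a).map (pvVal H A h_ a)).foldl max 0

def pvEmb (h_ a : List Int) (i : Nat) : Int × Int × Int :=
  ((i : Int), h_.getD i 0, a.getD i 0)

def pvS (n H A : Int) (h_ a : List Int) (r : Int) : List (Int × Int × Int) :=
  ((pvI n H A h_ a).filter (fun i => decide (r ≤ pvVal H A h_ a i))).map (pvEmb h_ a)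

lemma pvA_final (n H A : Int) (h_ a : List Int) :
    solution n H A h_ a = pvM n H A h_ a := by
  rw [pvSolutionA_eq]
  obtain ⟨hlen, h1, h0⟩ := pvInv n H A h_ a n.toNat le_rfl
  set dp := pvDpA n H A h_ a n.toNat with hdp
  rcases hI : pvI n H A h_ a with _ | ⟨i0, I'⟩
  · -- no defeatable monster: dp is all zeros and M = 0
    have hz : ∀ i, dp.getD i 0 = 0 := by
      intro i
      refine h0 i ?_
      rintro ⟨hik, hdfti⟩
      have : i ∈ pvI n H A h_ a :=
        List.mem_filter.mpr ⟨List.mem_range.mpr hik, hdfti⟩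
      rw [hI] at this; simp at this
    have hany : dp.any (fun x => decide (x ≠ 0)) = false := by
      rw [List.any_eq_false]
      intro x hx
      obtain ⟨i, hi, hix⟩ := List.mem_iff_getElem.mp hx
      have hgx : dp.getD i 0 = x := by rw [List.getD_eq_getElem _ _ hi, hix]
      have hx0 : x = 0 := by rw [← hgx]; exact hz i
      simp [hx0]
    rw [hany]
    simp [pvM, hI]
  · -- at least one defeatable monster
    have hi0 : i0 ∈ pvI n H A h_ a := by rw [hI]; simp
    have hi0N : i0 < n.toNat := List.mem_range.mp (List.mem_filter.mp hi0).1
    have hi0d : pvDft H A h_ a i0 = true := (List.mem_filter.mp hi0).2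
    have hdpi0 : dp.getD i0 0 = pvVal H A h_ a i0 := h1 i0 hi0N hi0d
    have hpos := pvVal_pos H A h_ a i0
    have hmem0 : dp.getD i0 0 ∈ dp := by
      rw [List.getD_eq_getElem _ _ (by rw [hlen]; exact hi0N)]
      exact List.getElem_mem _
    have hany : dp.any (fun x => decide (x ≠ 0)) = true :=
      List.any_eq_true.mpr ⟨dp.getD i0 0, hmem0, by exact decide_eq_true (by omega)⟩
    rw [if_pos hany]
    rcases hMx : PySem.List.max? dp (fun y => y) with _ | Mx
    · rw [PySem.List.max?_eq_none_iff] at hMx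
      rw [hMx] at hmem0; simp at hmem0
    · have hMxmem := PySem.List.max?_mem hMx
      have hMxmax := PySem.List.max?_isMax hMx
      obtain ⟨iM, hiM, hiMx⟩ := List.mem_iff_getElem.mp hMxmem
      have hgM : dp.getD iM 0 = Mx := by rw [List.getD_eq_getElem _ _ hiM, hiMx]
      have hMx1 : 1 ≤ Mx := le_trans (by rw [hdpi0]; exact hpos) (hMxmax _ hmem0)
      have hdM : pvDft H A h_ a iM = true := by
        by_contra hnd
        have := h0 iM (by tauto); omega
      have hiMN : iM < n.toNat := by omega
      have hiMI : iM ∈ pvI n H A h_ a :=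
        List.mem_filter.mpr ⟨List.mem_range.mpr hiMN, hdM⟩
      have hMle : Mx ≤ pvM n H A h_ a := by
        have : Mx ∈ (pvI n H A h_ a).map (pvVal H A h_ a) :=
          List.mem_map.mpr ⟨iM, hiMI, by rw [← h1 iM hiMN hdM, hgM]⟩
        exact pvFmMem _ 0 Mx this
      have hleM : pvM n H A h_ a ≤ Mx := by
        rcases pvFmCases ((pvI n H A h_ a).map (pvVal H A h_ a)) 0 with hc | hc
        · rw [pvM, hc]; omega
        · obtain ⟨j, hj, hjx⟩ := List.mem_map.mp hc
          have hjN : j < n.toNat := List.mem_range.mp (List.mem_filter.mp hj).1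
          have hjd : pvDft H A h_ a j = true := (List.mem_filter.mp hj).2
          have : pvM n H A h_ a ∈ dp := by
            rw [pvM, ← hjx, ← h1 j hjN hjd, List.getD_eq_getElem _ _ (by rw [hlen]; exact hjN)]
            exact List.getElem_mem _
          exact hMxmax _ this
      simp only [Option.getD_some]
      omega

-- B's items list is the r = 1 layer list (every pvVal is ≥ 1)
lemma pvFilterMapIf (L : List Nat) (p : Nat → Prop) [DecidablePred p] (f : Nat → Int × Int × Int) :
    L.filterMap (fun i => if p i then some (f i) else none)
      = (L.filter (fun i => decide (p i))).map f := by
  induction L with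
  | nil => rfl
  | cons x l ih =>
    by_cases hp : p x
    · simp [hp, ih]
    · simp [hp, ih]

lemma pvB_final (n H A : Int) (h_ a : List Int) :
    solution_alt n H A h_ a = pvPeelB (pvS n H A h_ a 1) := by
  have hS : pvS n H A h_ a 1 = (pvI n H A h_ a).map (pvEmb h_ a) := by
    rw [pvS, List.filter_eq_self.mpr]
    intro i _
    have := pvVal_pos H A h_ a i
    simpa using this
  rw [hS]
  simp only [solution_alt, PySem.List.pyRange_one, Int.sub_zero, List.filterMap_map]
  congr 1
  have hfc : ∀ x ∈ List.range n.toNat,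
      ((fun i => if H > PySem.List.pyGetD h_ i 0 ∧ A > PySem.List.pyGetD a i 0 then
          some (i, PySem.List.pyGetD h_ i 0, PySem.List.pyGetD a i 0) else none) ∘
        (fun k : Nat => (0 : Int) + k)) x
      = (fun i : Nat => if h_.getD i 0 < H ∧ a.getD i 0 < A then
          some (pvEmb h_ a i) else none) x := by
    intro x _
    simp [Function.comp, pvEmb, PySem.List.pyGetD_natCast]
  rw [List.filterMap_congr hfc, pvFilterMapIf _ _ (pvEmb h_ a)]
  congr 1
  apply List.filter_congr
  intro i _
  simp [pvDft]

-- the peeling pass maps layer r to layer r+1 (for r ≥ 1)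
lemma pvKeepS (n H A : Int) (h_ a : List Int) (r : Int) (hr : 1 ≤ r) :
    pvKeepB (pvS n H A h_ a r) = pvS n H A h_ a (r + 1) := by
  rw [pvKeepB, pvS, List.filter_map]
  set L := (pvI n H A h_ a).filter (fun i => decide (r ≤ pvVal H A h_ a i)) with hL
  have hcongr : ∀ i ∈ L,
      ((fun x => (L.map (pvEmb h_ a)).any (fun y =>
          decide (y.1 < x.1) && decide (y.2.1 < x.2.1) && decide (y.2.2 < x.2.2))) ∘ pvEmb h_ a) i
      = decide (r + 1 ≤ pvVal H A h_ a i) := by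
    intro i hiL
    have hiI : i ∈ pvI n H A h_ a := (List.mem_filter.mp hiL).1
    have hir : r ≤ pvVal H A h_ a i := by
      have := (List.mem_filter.mp hiL).2; simpa using this
    have hiN : i < n.toNat := List.mem_range.mp (List.mem_filter.mp hiI).1
    simp only [Function.comp, List.any_map]
    by_cases hgoal : r + 1 ≤ pvVal H A h_ a i
    · -- pvVal i ≥ r+1: the attained max gives a dominated predecessor with pvVal ≥ r
      rw [decide_eq_true hgoal, List.any_eq_true]
      have hfold : r ≤ ((List.range i).map
          (fun j => if pvC H A h_ a i j then pvVal H A h_ a j else 0)).foldl max 0 := by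
        have := pvVal_eq H A h_ a i; omega
      rcases pvFmCases ((List.range i).map
          (fun j => if pvC H A h_ a i j then pvVal H A h_ a j else 0)) 0 with hc | hc
      · omega
      · obtain ⟨j, hj, hjx⟩ := List.mem_map.mp hc
        have hji : j < i := List.mem_range.mp hj
        have hcj : pvC H A h_ a i j = true := by
          by_contra hnc
          rw [if_neg (by simpa using hnc)] at hjx
          omega
        rw [if_pos hcj] at hjx
        simp only [pvC, Bool.and_eq_true, decide_eq_true_eq] at hcj
        obtain ⟨⟨hdj, hhj⟩, haj⟩ := hcj
        refine ⟨j, ?_, ?_⟩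
        · refine List.mem_filter.mpr ⟨List.mem_filter.mpr ⟨List.mem_range.mpr (by omega), hdj⟩, ?_⟩
          simp only [decide_eq_true_eq]
          omega
        · have hcast : (j : Int) < (i : Int) := by exact_mod_cast hji
          simp [pvEmb, hcast]
          exact ⟨hhj, haj⟩
    · -- pvVal i < r+1 = r: no surviving predecessor can exist
      rw [decide_eq_false hgoal, List.any_eq_false]
      rintro j hjL
      have hjI : j ∈ pvI n H A h_ a := (List.mem_filter.mp hjL).1
      have hjr : r ≤ pvVal H A h_ a j := by
        have := (List.mem_filter.mp hjL).2; simpa using this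
      have hjd : pvDft H A h_ a j = true := (List.mem_filter.mp hjI).2
      intro hcontra
      simp only [Function.comp, pvEmb, Bool.and_eq_true, decide_eq_true_eq] at hcontra
      obtain ⟨⟨hji, hhj⟩, haj⟩ := hcontra
      have hjiN : j < i := by exact_mod_cast hji
      have hcj : pvC H A h_ a i j = true := by
        simp only [pvC, Bool.and_eq_true, decide_eq_true_eq]
        exact ⟨⟨hjd, hhj⟩, haj⟩
      have hmem : pvVal H A h_ a j ∈ (List.range i).map
          (fun j => if pvC H A h_ a i j then pvVal H A h_ a j else 0) := by
        refine List.mem_map.mpr ⟨j, List.mem_range.mpr hjiN, by rw [if_pos hcj]⟩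
      have hle := pvFmMem _ 0 _ hmem
      have := pvVal_eq H A h_ a i
      omega
  rw [List.filter_congr hcongr, pvS, hL, List.filter_filter]
  congr 1
  apply List.filter_congr
  intro i _
  by_cases h : r + 1 ≤ pvVal H A h_ a i
  · have h' : r ≤ pvVal H A h_ a i := by omega
    simp [h, h']
  · simp [h]

lemma pvS_nil_iff (n H A : Int) (h_ a : List Int) (r : Int) (hr : 1 ≤ r) :
    pvS n H A h_ a r = [] ↔ pvM n H A h_ a < r := by
  constructor
  · intro hnil
    have hall : ∀ i ∈ pvI n H A h_ a, pvVal H A h_ a i < r := by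
      intro i hi
      by_contra hge
      have : pvEmb h_ a i ∈ pvS n H A h_ a r := by
        refine List.mem_map.mpr ⟨i, List.mem_filter.mpr ⟨hi, by simp; omega⟩, rfl⟩
      rw [hnil] at this; simp at this
    rcases pvFmCases ((pvI n H A h_ a).map (pvVal H A h_ a)) 0 with hc | hc
    · rw [pvM, hc]; omega
    · obtain ⟨j, hj, hjx⟩ := List.mem_map.mp hc
      rw [pvM, ← hjx] at *
      exact hall j hj
  · intro hlt
    rw [pvS, List.map_eq_nil_iff, List.filter_eq_nil_iff]
    intro i hi
    have : pvVal H A h_ a i ≤ pvM n H A h_ a :=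
      pvFmMem _ 0 _ (List.mem_map.mpr ⟨i, hi, rfl⟩)
    simp only [decide_eq_true_eq]
    omega

lemma pvPeel_formula (n H A : Int) (h_ a : List Int) :
    ∀ t : Nat, ∀ r : Int, 1 ≤ r → (pvM n H A h_ a + 1 - r).toNat = t →
      pvPeelB (pvS n H A h_ a r) = max (pvM n H A h_ a + 1 - r) 0 := by
  intro t
  induction t with
  | zero =>
    intro r hr ht
    have hMr : pvM n H A h_ a < r := by omega
    have hnil : pvS n H A h_ a r = [] := (pvS_nil_iff n H A h_ a r hr).mpr hMr
    rw [pvPeelB, dif_pos hnil]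
    omega
  | succ t ih =>
    intro r hr ht
    have hrM : r ≤ pvM n H A h_ a := by omega
    have hne : pvS n H A h_ a r ≠ [] := by
      intro hnil
      have := (pvS_nil_iff n H A h_ a r hr).mp hnil
      omega
    rw [pvPeelB, dif_neg hne, pvKeepS n H A h_ a r hr,
      ih (r + 1) (by omega) (by omega)]
    omega

-- ===== VERDICT (by name: the statement is the Claim_ definition above) =====
theorem solution_spec : Claim_equal_solution := by
  intro n H A h_ a _ _
  unfold Spec_solution
  rw [pvA_final, pvB_final, pvPeel_formula n H A h_ a (pvM n H A h_ a).toNat 1 le_rfl (by omega)]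
  have h0 : 0 ≤ pvM n H A h_ a := pvFmInit _ 0
  omega
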